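-- pv_equiv track=rewrite | github.com/biomakespace/OpenPlantToy | control/check_circuit.py | tree_match
-- ===== SOURCE A (Python) =====
-- def tree_match( tree_1 , tree_2 ) :
--
--     #Start by assuming that they
--     #do match, then try to find a
--     #connection that has no match
--     is_match = True
--
--     #If either of the two input
--     #arrays is empty, report no match
--     is_match = not ( ( len( tree_1 ) == 0 ) or ( len( tree_2 ) == 0 ) )
--
--     #If the arrays do not match in length
--     #then they cannot match
--     is_match = len( tree_1 ) == len( tree_2 )
--
--     #If it has already been demonstrated
--     #that the arrays do not match, no
--     #need to test connection by connection
--     if is_match :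
--
--         #For each connection in one of the sets
--         for connection_1 in tree_1 :
--
--             #Assume there is no match
--             #in the other set
--             this_match = False
--
--             #Then check it against all connections
--             #in the other set for a match
--             for connection_2 in tree_2 :
--
--                 #The first and second entries of
--                 #the connection both have to match
--                 #Can't match first of one with
--                 #second of the other
--                 # i.e. [ 1 , 2 ] == [ 1 , 2 ]
--                 # but  [ 1 , 2 ] != [ 2 , 1 ]
--                 #order of connections is important
--                 if( ( connection_1[0] == connection_2[0] ) and ( connection_1[1] == connection_2[1] ) ) :
--                     this_match = True
--
--             #Since every single connection
--             #needs to find a match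
--             #"and" them all together
--             is_match = is_match and this_match
--
--     return is_match
-- ===== SOURCE B (Python) =====
-- def tree_match(tree_1, tree_2):
--     # Length guard first: nothing is indexed when the lengths differ.
--     if len(tree_1) != len(tree_2):
--         return False
--     # Counting argument instead of per-connection matching: merge the key
--     # sets of both trees and compare cardinalities.  The merged set grows
--     # beyond the tree_2 key set exactly when some tree_1 connection has a
--     # (first, second) pair that occurs nowhere in tree_2, so equal sizes
--     # mean every connection of tree_1 has a match.
--     keys_2 = {(c[0], c[1]) for c in tree_2}
--     merged = {(c[0], c[1]) for c in tree_1} | keys_2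
--     return len(merged) == len(keys_2)
-- ===== Notes on version B (the rewrite author's own statement) =====
-- stated objective: alternative
-- what changed: Replaces the nested per-connection matching loops with a counting argument: build the (c[0],c[1]) key sets once and decide by comparing the cardinality of their union with that of tree_2's key set.
-- outside the precondition, e.g. on tree_match([[1]], [[2, 3]]): A returns False, B raises IndexError
import Mathlib
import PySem

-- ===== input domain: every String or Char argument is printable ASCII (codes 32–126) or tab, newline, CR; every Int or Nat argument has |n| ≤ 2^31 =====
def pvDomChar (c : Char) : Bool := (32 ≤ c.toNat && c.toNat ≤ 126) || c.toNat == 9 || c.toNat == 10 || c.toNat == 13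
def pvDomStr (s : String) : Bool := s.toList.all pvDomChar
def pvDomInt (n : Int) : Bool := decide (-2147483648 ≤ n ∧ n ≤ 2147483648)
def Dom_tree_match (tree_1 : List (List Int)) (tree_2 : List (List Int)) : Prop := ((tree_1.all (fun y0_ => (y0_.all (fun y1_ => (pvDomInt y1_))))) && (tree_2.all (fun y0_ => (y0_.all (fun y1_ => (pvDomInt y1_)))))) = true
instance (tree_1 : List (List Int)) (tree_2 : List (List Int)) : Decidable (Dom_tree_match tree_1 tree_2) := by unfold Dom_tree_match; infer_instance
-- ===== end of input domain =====

-- B replaces A's nested matching loops with built (c[0],c[1]) key sets decided by a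
-- cardinality comparison of their union with tree_2's key set (objective: alternative).


-- ===== PORT A =====
-- connection_1[0] == connection_2[0] and connection_1[1] == connection_2[1],
-- with Python's short-circuit: [1] is only indexed when the [0]s are equal.
def connEq (c1 c2 : List Int) : Bool :=
  match PySem.List.pyGet? c1 0, PySem.List.pyGet? c2 0 with
  | some a, some b =>
      if a = b then
        match PySem.List.pyGet? c1 1, PySem.List.pyGet? c2 1 with
        | some u, some v => u = v
        | _, _ => false
      else false
  | _, _ => false

def tree_match (tree_1 : List (List Int)) (tree_2 : List (List Int)) : Bool :=
  let is_match := true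
  let is_match := !((tree_1.length == 0) || (tree_2.length == 0))
  let is_match := tree_1.length == tree_2.length
  if is_match then
    tree_1.foldl (fun is_match connection_1 =>
      let this_match :=
        tree_2.foldl (fun this_match connection_2 =>
          if connEq connection_1 connection_2 then true else this_match) false
      is_match && this_match) is_match
  else is_match

-- ===== PORT B =====
-- (c[0], c[1]); total form pyGetD, exact under Pre_tree_match (both indices in range)
def connKey (c : List Int) : Int × Int :=
  (PySem.List.pyGetD c 0 0, PySem.List.pyGetD c 1 0)

def tree_match_alt (tree_1 : List (List Int)) (tree_2 : List (List Int)) : Bool :=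
  if tree_1.length ≠ tree_2.length then false
  else
    let keys_2 : PySem.Set (Int × Int) := PySem.Set.ofList (tree_2.map connKey)
    let merged : PySem.Set (Int × Int) :=
      PySem.Set.union (PySem.Set.ofList (tree_1.map connKey)) keys_2
    PySem.Set.len merged == PySem.Set.len keys_2

-- ===== PRECONDITION & SPEC =====
-- Pre_ excludes inputs with equal-length trees containing a connection of fewer
-- than 2 entries: there A either raises IndexError or (when short-circuiting on
-- unequal [0] entries) returns, while B's set comprehensions always raise.
def Pre_tree_match (tree_1 : List (List Int)) (tree_2 : List (List Int)) : Prop :=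
  tree_1.length = tree_2.length →
    ((∀ c ∈ tree_1, 2 ≤ c.length) ∧ (∀ c ∈ tree_2, 2 ≤ c.length))
instance (tree_1 : List (List Int)) (tree_2 : List (List Int)) : Decidable (Pre_tree_match tree_1 tree_2) := by unfold Pre_tree_match; infer_instance
def pvWitness_tree_match : List (List Int) × List (List Int) := ([[1, 2], [3, 4]], [[3, 4], [1, 2]])

def Spec_tree_match (tree_1 : List (List Int)) (tree_2 : List (List Int)) (out : Bool) : Prop := out = tree_match_alt tree_1 tree_2
instance (tree_1 : List (List Int)) (tree_2 : List (List Int)) (out : Bool) : Decidable (Spec_tree_match tree_1 tree_2 out) := by unfold Spec_tree_match; infer_instance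

-- ===== CLAIM (what is proved, stated in full; the proofs are below) =====
def Claim_equal_tree_match : Prop := ∀ (tree_1 : List (List Int)) (tree_2 : List (List Int)), Dom_tree_match tree_1 tree_2 → Pre_tree_match tree_1 tree_2 → Spec_tree_match tree_1 tree_2 (tree_match tree_1 tree_2)

-- ===== LEMMAS AND PROOFS =====

-- A's inner loop: "this_match ← true on a hit" folds to an any.
theorem foldl_or_any (p : List Int → Bool) (l : List (List Int)) (b : Bool) :
    l.foldl (fun tm c => if p c then true else tm) b = (b || l.any p) := by
  induction l generalizing b with
  | nil => simp
  | cons x xs ih =>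
      simp only [List.foldl_cons, List.any_cons, ih]
      cases p x <;> cases b <;> simp

-- A's outer loop: "and them all together" folds to an all.
theorem foldl_and_all (q : List Int → Bool) (l : List (List Int)) (b : Bool) :
    l.foldl (fun acc c => acc && q c) b = (b && l.all q) := by
  induction l generalizing b with
  | nil => simp
  | cons x xs ih =>
      simp only [List.foldl_cons, List.all_cons, ih, Bool.and_assoc]

theorem connEq_eq_key (c1 c2 : List Int) (h1 : 2 ≤ c1.length) (h2 : 2 ≤ c2.length) :
    connEq c1 c2 = decide (connKey c1 = connKey c2) := by
  match c1, c2 with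
  | a :: u :: _, b :: v :: _ =>
      have p0 : ∀ t : List Int, (0:Int) ≤ (t.length : Int) + 1 := fun t => by omega
      by_cases hab : a = b <;> by_cases huv : u = v <;>
        simp [connEq, connKey, PySem.List.pyGet?, PySem.List.pyIdx?, PySem.List.pyGetD,
          p0, hab, huv, Prod.ext_iff]

-- The counting argument behind B: on Nodup lists, the merge has the size of the
-- second set exactly when the first is contained in it.
theorem union_len_eq_iff_subset (s t : List (Int × Int)) (hs : s.Nodup) (ht : t.Nodup) :
    ((PySem.Set.union s t).length = t.length) ↔ ∀ x ∈ s, x ∈ t := by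
  have hu : (PySem.Set.union s t).Nodup := PySem.Set.nodup_union s t hs
  have hmem : ∀ x, x ∈ PySem.Set.union s t ↔ x ∈ s ∨ x ∈ t := fun x => PySem.Set.mem_union s t x
  have hfin : (PySem.Set.union s t).toFinset = s.toFinset ∪ t.toFinset := by
    ext x; simp [hmem x]
  rw [← List.toFinset_card_of_nodup hu, ← List.toFinset_card_of_nodup ht, hfin]
  constructor
  · intro hcard x hx
    have hsub : t.toFinset ⊆ s.toFinset ∪ t.toFinset := Finset.subset_union_right
    have := Finset.eq_of_subset_of_card_le hsub (le_of_eq hcard)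
    have hx' : x ∈ s.toFinset ∪ t.toFinset := by simp [hx]
    rw [← this] at hx'
    simpa using hx'
  · intro h
    have : s.toFinset ∪ t.toFinset = t.toFinset := by
      apply Finset.union_eq_right.mpr
      intro x hx
      simp only [List.mem_toFinset] at hx ⊢
      exact h x hx
    rw [this]

theorem tree_match_spec' (tree_1 tree_2 : List (List Int))
    (hpre : Pre_tree_match tree_1 tree_2) :
    tree_match tree_1 tree_2 = tree_match_alt tree_1 tree_2 := by
  by_cases hlen : tree_1.length = tree_2.length
  · obtain ⟨h1, h2⟩ := hpre hlen
    simp only [tree_match, tree_match_alt, hlen, beq_self_eq_true, if_pos, ne_eq,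
      not_true_eq_false, if_false]
    have hA : tree_1.foldl (fun is_match c1 =>
        is_match && tree_2.foldl (fun tm c2 => if connEq c1 c2 then true else tm) false) true
        = tree_1.all (fun c1 => tree_2.any (fun c2 => connEq c1 c2)) := by
      rw [foldl_and_all (fun c1 => tree_2.foldl (fun tm c2 => if connEq c1 c2 then true else tm) false)]
      simp only [Bool.true_and]
      congr 1
      funext c1
      exact foldl_or_any (fun c2 => connEq c1 c2) tree_2 false
    rw [hA]
    -- B side: the union's length equals keys_2's length iff every key of tree_1 occurs
    have hlenB : ((PySem.Set.union (PySem.Set.ofList (tree_1.map connKey))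
          (PySem.Set.ofList (tree_2.map connKey))).length
          = (PySem.Set.ofList (tree_2.map connKey)).length)
        ↔ ∀ x ∈ PySem.Set.ofList (tree_1.map connKey),
            x ∈ PySem.Set.ofList (tree_2.map connKey) :=
      union_len_eq_iff_subset _ _ (PySem.Set.nodup_ofList _) (PySem.Set.nodup_ofList _)
    rw [Bool.eq_iff_iff, List.all_eq_true]
    simp only [PySem.Set.len, beq_iff_eq, Nat.cast_inj]
    rw [hlenB]
    constructor
    · intro h x hx
      rw [PySem.Set.mem_ofList, List.mem_map] at hx
      obtain ⟨c1, hc1, rfl⟩ := hx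
      have := h c1 hc1
      rw [List.any_eq_true] at this
      obtain ⟨c2, hc2, hEq⟩ := this
      rw [connEq_eq_key c1 c2 (h1 c1 hc1) (h2 c2 hc2), decide_eq_true_iff] at hEq
      rw [PySem.Set.mem_ofList, List.mem_map]
      exact ⟨c2, hc2, hEq.symm⟩
    · intro h c1 hc1
      have hx : connKey c1 ∈ PySem.Set.ofList (tree_1.map connKey) := by
        rw [PySem.Set.mem_ofList, List.mem_map]; exact ⟨c1, hc1, rfl⟩
      have := h _ hx
      rw [PySem.Set.mem_ofList, List.mem_map] at this
      obtain ⟨c2, hc2, hEq⟩ := this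
      rw [List.any_eq_true]
      exact ⟨c2, hc2, by rw [connEq_eq_key c1 c2 (h1 c1 hc1) (h2 c2 hc2)]; simp [hEq]⟩
  · simp only [tree_match, tree_match_alt, ne_eq, hlen]
    simp [hlen]

-- ===== VERDICT (by name: the statement is the Claim_ definition above) =====
theorem tree_match_spec : Claim_equal_tree_match := by
  intro t1 t2 _ hpre
  exact tree_match_spec' t1 t2 hpre
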